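-- pv_equiv track=rewrite | github.com/taimei-1024/cursor-plugins | plugins/confluence-editor/skills/confluence-editor/scripts/edit_table.py | find_tables
-- ===== SOURCE A (Python) =====
-- def find_tables(html):
--     """Find all <table>...</table> regions with their positions.
--
--     Returns list of (start, end, table_html) tuples.
--     """
--     tables = []
--     depth = 0
--     start = None
--
--     i = 0
--     while i < len(html):
--         # Look for <table or </table
--         if html[i:i+6].lower() == "<table":
--             if depth == 0:
--                 start = i
--             depth += 1
--             i += 6
--         elif html[i:i+8].lower() == "</table>":
--             depth -= 1
--             if depth == 0 and start is not None:
--                 end = i + 8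
--                 tables.append((start, end, html[start:end]))
--                 start = None
--             i += 8
--         else:
--             i += 1
--
--     return tables
-- ===== SOURCE B (Python) =====
-- import re
--
-- def find_tables(html):
--     """Find all <table>...</table> regions with their positions.
--
--     Returns list of (start, end, table_html) tuples.
--     """
--     tables = []
--     depth = 0
--     start = None
--     for m in re.finditer(r'<table|</table>', html, re.IGNORECASE):
--         if m.group().lower() == '<table':
--             if depth == 0:
--                 start = m.start()
--             depth += 1
--         else:
--             depth -= 1
--             if depth == 0 and start is not None:
--                 end = m.end()
--                 tables.append((start, end, html[start:end]))
--                 start = None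
--     return tables
-- ===== Notes on version B (the rewrite author's own statement) =====
-- stated objective: faster
-- what changed: Replaces A's per-character index loop with repeated string slicing by one re.finditer pass over the table open/close tag alternation (IGNORECASE), then a single fold over the match objects maintaining depth and start.
import Mathlib
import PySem

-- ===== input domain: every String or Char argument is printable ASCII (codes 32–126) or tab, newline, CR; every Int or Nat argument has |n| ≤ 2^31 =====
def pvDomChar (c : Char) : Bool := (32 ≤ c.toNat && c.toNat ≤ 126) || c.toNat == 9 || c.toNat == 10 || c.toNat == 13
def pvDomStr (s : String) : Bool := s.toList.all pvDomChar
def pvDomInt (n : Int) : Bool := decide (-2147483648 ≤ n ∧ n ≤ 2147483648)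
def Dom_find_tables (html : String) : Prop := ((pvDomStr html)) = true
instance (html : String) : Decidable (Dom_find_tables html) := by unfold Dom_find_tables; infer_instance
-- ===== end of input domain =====

-- B replaces A's single index loop by re.finditer producing the tag-match list, then a fold over the matches (alternative decomposition, same cost).

-- ===== PORT A =====
-- A's while-loop: state (tables, depth, start), index i advancing by 6/8/1.
def findTablesLoopA (cs : List Char) (tables : List (Int × Int × String))
    (depth : Int) (start : Option Int) (i : Nat) : List (Int × Int × String) :=
  if _h : i < cs.length then
    if PySem.Chars.lower (PySem.List.slice cs (some (i : Int)) (some ((i : Int) + 6))) = "<table".toList then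
      findTablesLoopA cs tables (depth + 1) (if depth = 0 then some (i : Int) else start) (i + 6)
    else if PySem.Chars.lower (PySem.List.slice cs (some (i : Int)) (some ((i : Int) + 8))) = "</table>".toList then
      -- depth -= 1, then the append test (depth' inlined)
      if depth - 1 = 0 then
        match start with
        | some s =>
            findTablesLoopA cs
              (tables ++ [(s, (i : Int) + 8,
                String.ofList (PySem.List.slice cs (some s) (some ((i : Int) + 8))))])
              (depth - 1) none (i + 8)
        | none => findTablesLoopA cs tables (depth - 1) start (i + 8)
      else findTablesLoopA cs tables (depth - 1) start (i + 8)
    else findTablesLoopA cs tables depth start (i + 1)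
  else tables
termination_by cs.length - i

def find_tables (html : String) : List (Int × Int × String) :=
  findTablesLoopA html.toList [] 0 none 0

-- ===== PORT B =====
-- re.finditer(r'<table|</table>', html, re.IGNORECASE): leftmost, non-overlapping,
-- alternatives tried in order at each position; yields (start, end, matched text).
def tagMatches (cs : List Char) (i : Nat) : List (Nat × Nat × List Char) :=
  if _h : i < cs.length then
    let s6 := PySem.List.slice cs (some (i : Int)) (some ((i : Int) + 6))
    if PySem.Chars.lower s6 = "<table".toList then
      (i, i + 6, s6) :: tagMatches cs (i + 6)
    else
      let s8 := PySem.List.slice cs (some (i : Int)) (some ((i : Int) + 8))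
      if PySem.Chars.lower s8 = "</table>".toList then
        (i, i + 8, s8) :: tagMatches cs (i + 8)
      else tagMatches cs (i + 1)
  else []
termination_by cs.length - i

-- body of B's for-loop: one match updates (tables, depth, start)
def stepB (cs : List Char) (st : List (Int × Int × String) × Int × Option Int)
    (m : Nat × Nat × List Char) : List (Int × Int × String) × Int × Option Int :=
  let (tables, depth, start) := st
  if PySem.Chars.lower m.2.2 = "<table".toList then
    (tables, depth + 1, if depth = 0 then some (m.1 : Int) else start)
  else
    if depth - 1 = 0 then
      match start with
      | some s =>
          (tables ++ [(s, (m.2.1 : Int),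
            String.ofList (PySem.List.slice cs (some s) (some (m.2.1 : Int))))],
           depth - 1, none)
      | none => (tables, depth - 1, start)
    else (tables, depth - 1, start)

def find_tables_alt (html : String) : List (Int × Int × String) :=
  ((tagMatches html.toList 0).foldl (stepB html.toList) ([], 0, none)).1

-- ===== PRECONDITION & SPEC =====
def Spec_find_tables (html : String) (out : List (Int × Int × String)) : Prop := out = find_tables_alt html
instance (html : String) (out : List (Int × Int × String)) : Decidable (Spec_find_tables html out) := by unfold Spec_find_tables; infer_instance

-- ===== CLAIM (what is proved, stated in full; the proofs are below) =====
def Claim_equal_find_tables : Prop := ∀ (html : String), Dom_find_tables html → Spec_find_tables html (find_tables html)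

-- ===== LEMMAS AND PROOFS =====
lemma loopA_eq_fold (cs : List Char) (n : Nat) : ∀ (i : Nat), cs.length - i ≤ n →
    ∀ (tables : List (Int × Int × String)) (depth : Int) (start : Option Int),
    findTablesLoopA cs tables depth start i =
      ((tagMatches cs i).foldl (stepB cs) (tables, depth, start)).1 := by
  induction n with
  | zero =>
      intro i hi tables depth start
      have h : ¬ i < cs.length := by omega
      rw [findTablesLoopA.eq_def, tagMatches.eq_def]
      simp [h]
  | succ n ih =>
      intro i hi tables depth start
      rw [findTablesLoopA.eq_def, tagMatches.eq_def]
      by_cases h : i < cs.length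
      · simp only [dif_pos h]
        by_cases hop : PySem.Chars.lower
            (PySem.List.slice cs (some (i : Int)) (some ((i : Int) + 6))) = "<table".toList
        · simp only [List.foldl_cons, stepB, if_pos hop]
          exact ih (i + 6) (by omega) _ _ _
        · by_cases hcl : PySem.Chars.lower
              (PySem.List.slice cs (some (i : Int)) (some ((i : Int) + 8))) = "</table>".toList
          · have hne : ¬ PySem.Chars.lower
                (PySem.List.slice cs (some (i : Int)) (some ((i : Int) + 8))) = "<table".toList := by
              rw [hcl]; decide
            simp only [if_neg hop, if_pos hcl, List.foldl_cons, stepB, if_neg hne,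
              Nat.cast_add, Nat.cast_ofNat]
            by_cases hd : depth - 1 = 0
            · simp only [if_pos hd]
              cases start with
              | some s => exact ih (i + 8) (by omega) _ _ _
              | none => exact ih (i + 8) (by omega) _ _ _
            · simp only [if_neg hd]
              exact ih (i + 8) (by omega) _ _ _
          · simp only [if_neg hop, if_neg hcl]
            exact ih (i + 1) (by omega) _ _ _
      · simp [h]

-- ===== VERDICT (by name: the statement is the Claim_ definition above) =====
theorem find_tables_spec : Claim_equal_find_tables := by
  intro html _
  unfold Spec_find_tables find_tables find_tables_alt
  exact loopA_eq_fold html.toList html.toList.length 0 (by omega) [] 0 none
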